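-- pv_equiv track=rewrite | github.com/Garcipaldis/bridge_datascience_JorgeGarcia | Battleships/Hundir_flota_SIN_JSON.py | to_coordinates
-- ===== SOURCE A (Python) =====
-- def to_coordinates(x, y, size, orientacion):
--     """ Método que transforma los atributos de la instancia de Ship en una lista de coordenadas.
--         - Args:
--             - x: Fila x
--             - y: Columna y
--             - size: Tamaño del barco
--             - orientacion: Toma valores ['N', 'S', 'O', 'E'] representando los ejes cardinales.
--         -Returns:
--             - Lista de coordenadas.
--     """
--     coordenadas = [(x, y)]
--     for n in range(size-1):
--         if orientacion == 'N':
--             x -= 1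
--             coordenadas.append((x,y))
--         elif orientacion == 'S':
--             x += 1
--             coordenadas.append((x,y))
--         elif orientacion == 'E':
--             y += 1
--             coordenadas.append((x,y))
--         if orientacion == 'O':
--             y -= 1
--             coordenadas.append((x,y))
--     return coordenadas
-- ===== SOURCE B (Python) =====
-- def to_coordinates(x, y, size, orientacion):
--     deltas = {'N': (-1, 0), 'S': (1, 0), 'E': (0, 1), 'O': (0, -1)}
--     coords = [(x, y)]
--     if orientacion in deltas:
--         dx, dy = deltas[orientacion]
--         coords += [(x + dx * i, y + dy * i) for i in range(1, size)]
--     return coords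
-- ===== Notes on version B (the rewrite author's own statement) =====
-- stated objective: simpler
-- what changed: Replaces the per-iteration branch-and-mutate loop with a direction table and a single closed-form comprehension (x+dx*i, y+dy*i) over range(1, size).
import Mathlib
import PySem

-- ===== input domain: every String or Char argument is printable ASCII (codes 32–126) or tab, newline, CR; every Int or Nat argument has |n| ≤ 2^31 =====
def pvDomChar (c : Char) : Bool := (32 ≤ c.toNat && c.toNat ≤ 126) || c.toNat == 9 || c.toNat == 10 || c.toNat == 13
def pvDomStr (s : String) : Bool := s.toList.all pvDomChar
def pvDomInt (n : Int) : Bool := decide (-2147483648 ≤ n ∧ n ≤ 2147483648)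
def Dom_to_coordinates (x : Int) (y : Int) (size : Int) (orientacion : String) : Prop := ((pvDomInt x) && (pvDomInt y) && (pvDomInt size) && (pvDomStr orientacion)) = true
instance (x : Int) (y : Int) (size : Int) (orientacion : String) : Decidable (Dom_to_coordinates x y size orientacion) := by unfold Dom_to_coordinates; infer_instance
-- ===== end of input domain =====

-- B replaces A's per-iteration branch-and-mutate loop by a direction table and a
-- closed-form map (x+dx*i, y+dy*i) over range(1, size) — simpler decomposition.


-- ===== PORT A =====
-- literal transliteration: loop over range(size-1), elif chain for N/S/E, then a
-- separate `if` for 'O' (exactly as in the Python), state = (coordenadas, x, y)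
def to_coordinates (x : Int) (y : Int) (size : Int) (orientacion : String) : List (Int × Int) :=
  let st :=
    (PySem.List.pyRange 0 (size - 1) 1).foldl
      (fun (st : List (Int × Int) × Int × Int) _ =>
        let st1 :=
          if orientacion = "N" then
            (st.1 ++ [(st.2.1 - 1, st.2.2)], st.2.1 - 1, st.2.2)
          else if orientacion = "S" then
            (st.1 ++ [(st.2.1 + 1, st.2.2)], st.2.1 + 1, st.2.2)
          else if orientacion = "E" then
            (st.1 ++ [(st.2.1, st.2.2 + 1)], st.2.1, st.2.2 + 1)
          else st
        if orientacion = "O" then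
          (st1.1 ++ [(st1.2.1, st1.2.2 - 1)], st1.2.1, st1.2.2 - 1)
        else st1)
      ([(x, y)], x, y)
  st.1

-- ===== PORT B =====
def to_coordinates_alt (x : Int) (y : Int) (size : Int) (orientacion : String) : List (Int × Int) :=
  let deltas : PySem.Dict String (Int × Int) :=
    PySem.Dict.ofList [("N", (-1, 0)), ("S", (1, 0)), ("E", (0, 1)), ("O", (0, -1))]
  match deltas.get? orientacion with
  | some (dx, dy) =>
      [(x, y)] ++ (PySem.List.pyRange 1 size 1).map (fun i => (x + dx * i, y + dy * i))
  | none => [(x, y)]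

-- ===== PRECONDITION & SPEC =====
def Spec_to_coordinates (x : Int) (y : Int) (size : Int) (orientacion : String) (out : List (Int × Int)) : Prop := out = to_coordinates_alt x y size orientacion
instance (x : Int) (y : Int) (size : Int) (orientacion : String) (out : List (Int × Int)) : Decidable (Spec_to_coordinates x y size orientacion out) := by unfold Spec_to_coordinates; infer_instance

-- ===== CLAIM (what is proved, stated in full; the proofs are below) =====
def Claim_equal_to_coordinates : Prop := ∀ (x : Int) (y : Int) (size : Int) (orientacion : String), Dom_to_coordinates x y size orientacion → Spec_to_coordinates x y size orientacion (to_coordinates x y size orientacion)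

-- ===== LEMMAS AND PROOFS =====

-- Generic shape of A's loop once the orientation is fixed: each step appends the
-- shifted point and shifts the state by (dx, dy).
theorem stepfold (dx dy : Int) (l : List Int) :
    ∀ (x y : Int) (c : List (Int × Int)),
      l.foldl (fun (st : List (Int × Int) × Int × Int) _ =>
          (st.1 ++ [(st.2.1 + dx, st.2.2 + dy)], st.2.1 + dx, st.2.2 + dy)) (c, x, y)
      = (c ++ (List.range l.length).map
            (fun (k : Nat) => (x + dx * ((k : Int) + 1), y + dy * ((k : Int) + 1))),
          x + dx * l.length, y + dy * l.length) := by
  induction l with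
  | nil => intro x y c; simp
  | cons a l ih =>
      intro x y c
      rw [List.foldl_cons, ih]
      refine Prod.ext ?_ (Prod.ext (by simp only [List.length_cons]; push_cast; ring) (by simp only [List.length_cons]; push_cast; ring))
      show c ++ [(x + dx, y + dy)]
            ++ (List.range l.length).map
                (fun (k : Nat) => (x + dx + dx * ((k : Int) + 1), y + dy + dy * ((k : Int) + 1)))
          = c ++ (List.range (l.length + 1)).map
                (fun (k : Nat) => (x + dx * ((k : Int) + 1), y + dy * ((k : Int) + 1)))
      rw [List.range_succ_eq_map, List.map_cons, List.map_map, List.append_assoc,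
        List.singleton_append]
      congr 1
      norm_num
      intro a _
      constructor <;> ring

-- B's comprehension over range(1, size) written over List.range (size-1).toNat
theorem bmap (dx dy x y size : Int) :
    (PySem.List.pyRange 1 size 1).map (fun i => (x + dx * i, y + dy * i))
    = (List.range (size - 1).toNat).map
        (fun (k : Nat) => (x + dx * ((k : Int) + 1), y + dy * ((k : Int) + 1))) := by
  rw [PySem.List.pyRange_one, List.map_map]
  refine List.map_congr_left (fun k _ => ?_)
  simp only [Function.comp_apply, Prod.mk.injEq]
  constructor <;> ring

-- Per-direction reduction of A to the generic fold
theorem dir_case (x y size : Int) (o : String) (dx dy : Int)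
    (hbody : (fun (st : List (Int × Int) × Int × Int) (_ : Int) =>
        let st1 :=
          if o = "N" then (st.1 ++ [(st.2.1 - 1, st.2.2)], st.2.1 - 1, st.2.2)
          else if o = "S" then (st.1 ++ [(st.2.1 + 1, st.2.2)], st.2.1 + 1, st.2.2)
          else if o = "E" then (st.1 ++ [(st.2.1, st.2.2 + 1)], st.2.1, st.2.2 + 1)
          else st
        if o = "O" then (st1.1 ++ [(st1.2.1, st1.2.2 - 1)], st1.2.1, st1.2.2 - 1)
        else st1)
      = (fun (st : List (Int × Int) × Int × Int) _ =>
          (st.1 ++ [(st.2.1 + dx, st.2.2 + dy)], st.2.1 + dx, st.2.2 + dy))) :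
    to_coordinates x y size o
    = [(x, y)] ++ (PySem.List.pyRange 1 size 1).map (fun i => (x + dx * i, y + dy * i)) := by
  unfold to_coordinates
  rw [hbody, stepfold, bmap]
  simp [PySem.List.length_pyRange_one]

theorem to_coordinates_spec : Claim_equal_to_coordinates := by
  intro x y size o _
  show to_coordinates x y size o = to_coordinates_alt x y size o
  by_cases hN : o = "N"
  · subst hN
    rw [dir_case x y size "N" (-1) 0 (by funext st n; simp [sub_eq_add_neg])]
    rfl
  by_cases hS : o = "S"
  · subst hS
    rw [dir_case x y size "S" 1 0 (by funext st n; simp)]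
    rfl
  by_cases hE : o = "E"
  · subst hE
    rw [dir_case x y size "E" 0 1 (by funext st n; simp)]
    rfl
  by_cases hO : o = "O"
  · subst hO
    rw [dir_case x y size "O" 0 (-1) (by funext st n; simp [sub_eq_add_neg])]
    rfl
  · -- unknown orientation: A's loop body is the identity, B's lookup misses
    unfold to_coordinates to_coordinates_alt
    have hbody : (fun (st : List (Int × Int) × Int × Int) (_ : Int) =>
        let st1 :=
          if o = "N" then (st.1 ++ [(st.2.1 - 1, st.2.2)], st.2.1 - 1, st.2.2)
          else if o = "S" then (st.1 ++ [(st.2.1 + 1, st.2.2)], st.2.1 + 1, st.2.2)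
          else if o = "E" then (st.1 ++ [(st.2.1, st.2.2 + 1)], st.2.1, st.2.2 + 1)
          else st
        if o = "O" then (st1.1 ++ [(st1.2.1, st1.2.2 - 1)], st1.2.1, st1.2.2 - 1)
        else st1)
        = (fun st _ => st) := by
      funext st n; simp [hN, hS, hE, hO]
    rw [hbody]
    have hmk : (PySem.Dict.ofList
        [("N", ((-1 : Int), (0 : Int))), ("S", (1, 0)), ("E", (0, 1)), ("O", (0, -1))])
        = PySem.Dict.mk [("N", (-1, 0)), ("S", (1, 0)), ("E", (0, 1)), ("O", (0, -1))] := by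
      rfl
    have hget : (PySem.Dict.ofList
        [("N", ((-1 : Int), (0 : Int))), ("S", (1, 0)), ("E", (0, 1)), ("O", (0, -1))]).get? o
        = none := by
      rw [hmk]
      simp [PySem.Dict.get?, Ne.symm hN, Ne.symm hS,
        Ne.symm hE, Ne.symm hO]
    simp [hget, List.foldl_fixed]
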